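-- pv_equiv track=rewrite | github.com/BZKgenesis/contour | implementation/filtre_de_canny.py | seuillage_hysteresis
-- ===== SOURCE A (Python) =====
-- def seuillage_hysteresis(image, bas, haut):
--     hauteur = len(image)
--     largeur = len(image[0])
--     resultat = [[0 for _ in range(largeur)] for _ in range(hauteur)]
--
--     for i in range(1, hauteur - 1):
--         for j in range(1, largeur - 1):
--             if image[i][j] >= haut:
--                 resultat[i][j] = 255
--             elif image[i][j] < bas:
--                 resultat[i][j] = 0
--             else:
--                 if any(image[ni][nj] >= haut for ni in range(i - 1, i + 2) for nj in range(j - 1, j + 2)):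
--                     resultat[i][j] = 255
--                 else:
--                     resultat[i][j] = 0
--     return resultat
-- ===== SOURCE B (Python) =====
-- def seuillage_hysteresis(image, bas, haut):
--     h = len(image)
--     w = len(image[0])
--     res = [[0] * w for _ in range(h)]
--     # pass 1: mark interior strong pixels
--     for i in range(1, h - 1):
--         row = image[i]
--         for j in range(1, w - 1):
--             if row[j] >= haut:
--                 res[i][j] = 255
--     # pass 2: each strong pixel (anywhere) lights its interior weak neighbours
--     for p, row in enumerate(image):
--         for q, v in enumerate(row):
--             if v >= haut:
--                 for i in range(max(1, p - 1), min(h - 2, p + 1) + 1):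
--                     for j in range(max(1, q - 1), min(w - 2, q + 1) + 1):
--                         if bas <= image[i][j] < haut:
--                             res[i][j] = 255
--     return res
-- ===== Notes on version B (the rewrite author's own statement) =====
-- stated objective: alternative
-- what changed: B replaces A's per-weak-pixel 3x3 neighbour gather by two passes over the image: first mark interior strong pixels, then scatter 255 from every strong pixel (edge pixels included) to each interior neighbour lying in the weak band [bas, haut).
import Mathlib
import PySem

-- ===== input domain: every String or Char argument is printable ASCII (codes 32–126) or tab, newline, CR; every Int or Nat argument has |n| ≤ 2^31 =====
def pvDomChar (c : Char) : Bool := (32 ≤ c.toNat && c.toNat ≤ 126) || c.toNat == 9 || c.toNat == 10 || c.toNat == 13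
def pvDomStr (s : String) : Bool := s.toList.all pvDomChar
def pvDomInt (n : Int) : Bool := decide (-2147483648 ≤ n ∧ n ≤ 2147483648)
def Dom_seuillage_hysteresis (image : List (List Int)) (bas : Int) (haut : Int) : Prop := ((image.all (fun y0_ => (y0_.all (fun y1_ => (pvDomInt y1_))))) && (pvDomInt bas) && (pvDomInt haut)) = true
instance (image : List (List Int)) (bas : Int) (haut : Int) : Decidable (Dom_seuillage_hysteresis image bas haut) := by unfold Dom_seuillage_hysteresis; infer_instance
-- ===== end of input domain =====

-- B reworks A's per-weak-pixel 3x3 gather into two passes (mark interior strong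
-- pixels, then scatter 255 from every strong pixel to its interior weak
-- neighbours); objective: alternative decomposition, same asymptotic cost.

-- shared primitive reads/writes (exact for the in-range accesses both programs make)
def pvRd (g : List (List Int)) (i j : Nat) : Int := (g.getD i []).getD j 0
def pvWr (g : List (List Int)) (i j : Nat) (v : Int) : List (List Int) :=
  g.set i ((g.getD i []).set j v)

-- ===== PORT A =====
-- A's `any(image[ni][nj] >= haut for ni in range(i-1,i+2) for nj in range(j-1,j+2))`
def pvAnyNb (image : List (List Int)) (haut : Int) (i j : Nat) : Bool :=
  (List.range' (i-1) 3).any fun ni => (List.range' (j-1) 3).any fun nj =>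
    decide (haut ≤ pvRd image ni nj)

-- A's inner loop body (the assignment to resultat[i][j])
def stepA_j (image : List (List Int)) (bas haut : Int) (i : Nat)
    (res : List (List Int)) (j : Nat) : List (List Int) :=
  if haut ≤ pvRd image i j then pvWr res i j 255
  else if pvRd image i j < bas then pvWr res i j 0
  else if pvAnyNb image haut i j then pvWr res i j 255
  else pvWr res i j 0

def seuillage_hysteresis (image : List (List Int)) (bas : Int) (haut : Int) : List (List Int) :=
  (List.range' 1 (image.length - 2)).foldl
    (fun res i => (List.range' 1 (image.headI.length - 2)).foldl (stepA_j image bas haut i) res)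
    (List.replicate image.length (List.replicate image.headI.length 0))

-- ===== PORT B =====
-- pass 1 body: mark an interior strong pixel
def stepB1_j (image : List (List Int)) (haut : Int) (i : Nat)
    (res : List (List Int)) (j : Nat) : List (List Int) :=
  if haut ≤ pvRd image i j then pvWr res i j 255 else res

-- pass 2, innermost: light interior neighbour (i,j) if it is in the weak band
def stepB2_j (image : List (List Int)) (bas haut : Int) (i : Nat)
    (res : List (List Int)) (j : Nat) : List (List Int) :=
  if bas ≤ pvRd image i j ∧ pvRd image i j < haut then pvWr res i j 255 else res

def stepB2_i (image : List (List Int)) (bas haut : Int) (w q : Nat)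
    (res : List (List Int)) (i : Nat) : List (List Int) :=
  (List.range' (max 1 (q-1)) (min (w-2) (q+1) + 1 - max 1 (q-1))).foldl
    (stepB2_j image bas haut i) res

def stepB2_q (image : List (List Int)) (bas haut : Int) (hh w p : Nat)
    (res : List (List Int)) (q : Nat) : List (List Int) :=
  if haut ≤ (image.getD p []).getD q 0 then
    (List.range' (max 1 (p-1)) (min (hh-2) (p+1) + 1 - max 1 (p-1))).foldl
      (stepB2_i image bas haut w q) res
  else res

def stepB2_p (image : List (List Int)) (bas haut : Int) (hh w : Nat)
    (res : List (List Int)) (p : Nat) : List (List Int) :=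
  (List.range (image.getD p []).length).foldl (stepB2_q image bas haut hh w p) res

def seuillage_hysteresis_alt (image : List (List Int)) (bas : Int) (haut : Int) : List (List Int) :=
  let hh := image.length
  let w := image.headI.length
  let res1 := (List.range' 1 (hh - 2)).foldl
    (fun res i => (List.range' 1 (w - 2)).foldl (stepB1_j image haut i) res)
    (List.replicate hh (List.replicate w 0))
  (List.range hh).foldl (stepB2_p image bas haut hh w) res1

-- ===== PRECONDITION & SPEC =====
-- Pre_ excludes the empty image (A raises IndexError on image[0]) and, when both
-- dimensions are at least 3, ragged images having a row shorter than the first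
-- row, on which A's neighbour reads image[ni][nj] may raise IndexError (on a few
-- such ragged inputs A happens to return before reaching the short row; see cites).
def Pre_seuillage_hysteresis (image : List (List Int)) (bas : Int) (haut : Int) : Prop :=
  image ≠ [] ∧ (3 ≤ image.length → 3 ≤ image.headI.length →
    ∀ row ∈ image, image.headI.length ≤ row.length)
instance (image : List (List Int)) (bas : Int) (haut : Int) : Decidable (Pre_seuillage_hysteresis image bas haut) := by unfold Pre_seuillage_hysteresis; infer_instance

def pvWitness_seuillage_hysteresis : List (List Int) × Int × Int :=
  ([[1, 2, 3], [4, 9, 6], [7, 8, 0]], 2, 5)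

def Spec_seuillage_hysteresis (image : List (List Int)) (bas : Int) (haut : Int) (out : List (List Int)) : Prop := out = seuillage_hysteresis_alt image bas haut
instance (image : List (List Int)) (bas : Int) (haut : Int) (out : List (List Int)) : Decidable (Spec_seuillage_hysteresis image bas haut out) := by unfold Spec_seuillage_hysteresis; infer_instance

-- ===== CLAIM (what is proved, stated in full; the proofs are below) =====
def Claim_equal_seuillage_hysteresis : Prop := ∀ (image : List (List Int)) (bas : Int) (haut : Int), Dom_seuillage_hysteresis image bas haut → Pre_seuillage_hysteresis image bas haut → Spec_seuillage_hysteresis image bas haut (seuillage_hysteresis image bas haut)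

-- ===== LEMMAS AND PROOFS =====

def pvShape (g : List (List Int)) (hh w : Nat) : Prop :=
  g.length = hh ∧ ∀ k, k < hh → (g.getD k []).length = w

lemma pv_mem_range' (s n m : Nat) : m ∈ List.range' s n ↔ s ≤ m ∧ m < s + n := by
  constructor
  · intro h
    obtain ⟨t, ht, rfl⟩ := by simpa [List.mem_range'] using h
    omega
  · rintro ⟨h1, h2⟩
    simp only [List.mem_range']
    exact ⟨m - s, by omega, by omega⟩

lemma pv_getD_set (g : List (List Int)) (i k : Nat) (r : List Int) :
    (g.set i r).getD k [] = if i = k ∧ i < g.length then r else g.getD k [] := by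
  simp only [List.getD, List.getElem?_set]
  by_cases h1 : i = k
  · subst h1
    by_cases h2 : i < g.length <;> simp [h2]
  · simp [h1]

lemma pv_getD_set_int (r : List Int) (j k : Nat) (v : Int) :
    (r.set j v).getD k 0 = if j = k ∧ j < r.length then v else r.getD k 0 := by
  simp only [List.getD, List.getElem?_set]
  by_cases h1 : j = k
  · subst h1
    by_cases h2 : j < r.length <;> simp [h2]
  · simp [h1]

lemma pv_rd_wr (g : List (List Int)) (i j i' j' : Nat) (v : Int) :
    pvRd (pvWr g i j v) i' j' =
      if i = i' ∧ j = j' ∧ i < g.length ∧ j < (g.getD i []).length then v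
      else pvRd g i' j' := by
  unfold pvRd pvWr
  rw [pv_getD_set]
  by_cases h1 : i = i' ∧ i < g.length
  · rw [if_pos h1]
    obtain ⟨rfl, hlen⟩ := h1
    rw [pv_getD_set_int]
    by_cases h2 : j = j' ∧ j < (g.getD i []).length
    · rw [if_pos h2, if_pos ⟨rfl, h2.1, hlen, h2.2⟩]
    · rw [if_neg h2, if_neg (by rintro ⟨-, hj, -, hl⟩; exact h2 ⟨hj, hl⟩)]
  · rw [if_neg h1, if_neg (by rintro ⟨hi, -, hl, -⟩; exact h1 ⟨hi, hl⟩)]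

lemma pvWr_shape (g : List (List Int)) (hh w i j : Nat) (v : Int)
    (h : pvShape g hh w) : pvShape (pvWr g i j v) hh w := by
  refine ⟨by simp [pvWr, h.1], ?_⟩
  intro k hk
  rw [pvWr, pv_getD_set]
  split_ifs with hc
  · obtain ⟨rfl, hlen⟩ := hc
    rw [List.length_set]
    exact h.2 i hk
  · exact h.2 k hk

lemma pv_shape_rep (hh w : Nat) :
    pvShape (List.replicate hh (List.replicate w (0:Int))) hh w := by
  refine ⟨by simp, ?_⟩
  intro k hk
  simp [List.getD, hk]

lemma pv_rd_rep (hh w i j : Nat) :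
    pvRd (List.replicate hh (List.replicate w (0:Int))) i j = 0 := by
  unfold pvRd
  simp only [List.getD, List.getElem?_replicate]
  by_cases hk : i < hh <;> by_cases hj : j < w <;> simp [hk, hj]

lemma pv_foldl_shape {α : Type} (L : List α) (step : List (List Int) → α → List (List Int))
    (g : List (List Int)) (hh w : Nat)
    (hs : ∀ res x, x ∈ L → pvShape res hh w → pvShape (step res x) hh w)
    (hg : pvShape g hh w) : pvShape (L.foldl step g) hh w := by
  induction L generalizing g with
  | nil => simpa using hg
  | cons a L ih =>
    simp only [List.foldl_cons]
    exact ih _ (fun res x hx => hs res x (List.mem_cons_of_mem _ hx))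
      (hs g a (List.mem_cons_self) hg)

lemma pv_foldl_rd_const {α : Type} (L : List α) (step : List (List Int) → α → List (List Int))
    (g : List (List Int)) (hh w i j : Nat)
    (hs : ∀ res x, x ∈ L → pvShape res hh w → pvShape (step res x) hh w)
    (hg : pvShape g hh w)
    (h : ∀ res x, x ∈ L → pvShape res hh w → pvRd (step res x) i j = pvRd res i j) :
    pvRd (L.foldl step g) i j = pvRd g i j := by
  induction L generalizing g with
  | nil => simp
  | cons a L ih =>
    simp only [List.foldl_cons]
    rw [ih _ (fun res x hx => hs res x (List.mem_cons_of_mem _ hx))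
      (hs g a (List.mem_cons_self) hg)
      (fun res x hx => h res x (List.mem_cons_of_mem _ hx))]
    exact h g a (List.mem_cons_self) hg

lemma pv_foldl_rd_keep {α : Type} (L : List α) (step : List (List Int) → α → List (List Int))
    (g : List (List Int)) (hh w i j : Nat) (v0 : Int)
    (hs : ∀ res x, x ∈ L → pvShape res hh w → pvShape (step res x) hh w)
    (hg : pvShape g hh w)
    (h : ∀ res x, x ∈ L → pvShape res hh w →
      pvRd (step res x) i j = pvRd res i j ∨ pvRd (step res x) i j = v0)
    (hgv : pvRd g i j = v0) : pvRd (L.foldl step g) i j = v0 := by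
  induction L generalizing g with
  | nil => simpa using hgv
  | cons a L ih =>
    simp only [List.foldl_cons]
    refine ih _ (fun res x hx => hs res x (List.mem_cons_of_mem _ hx))
      (hs g a (List.mem_cons_self) hg)
      (fun res x hx => h res x (List.mem_cons_of_mem _ hx)) ?_
    rcases h g a (List.mem_cons_self) hg with h' | h'
    · rw [h', hgv]
    · exact h'

lemma pv_foldl_rd_hit {α : Type} (L : List α) (step : List (List Int) → α → List (List Int))
    (g : List (List Int)) (hh w i j : Nat) (v0 : Int)
    (hs : ∀ res x, x ∈ L → pvShape res hh w → pvShape (step res x) hh w)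
    (hg : pvShape g hh w)
    (h : ∀ res x, x ∈ L → pvShape res hh w →
      pvRd (step res x) i j = pvRd res i j ∨ pvRd (step res x) i j = v0)
    (hx : ∃ x ∈ L, ∀ res, pvShape res hh w → pvRd (step res x) i j = v0) :
    pvRd (L.foldl step g) i j = v0 := by
  induction L generalizing g with
  | nil => obtain ⟨x, hx1, -⟩ := hx; simp at hx1
  | cons a L ih =>
    simp only [List.foldl_cons]
    obtain ⟨x, hx1, hx2⟩ := hx
    rcases List.mem_cons.mp hx1 with rfl | hmem
    · exact pv_foldl_rd_keep L step _ hh w i j v0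
        (fun res y hy => hs res y (List.mem_cons_of_mem _ hy))
        (hs g x (List.mem_cons_self) hg)
        (fun res y hy => h res y (List.mem_cons_of_mem _ hy))
        (hx2 g hg)
    · exact ih _ (fun res y hy => hs res y (List.mem_cons_of_mem _ hy))
        (hs g a (List.mem_cons_self) hg)
        (fun res y hy => h res y (List.mem_cons_of_mem _ hy))
        ⟨x, hmem, hx2⟩

-- ----- A -----

-- the value A assigns to interior cell (i,j)
def cellA (image : List (List Int)) (bas haut : Int) (i j : Nat) : Int :=
  if haut ≤ pvRd image i j then 255
  else if pvRd image i j < bas then 0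
  else if pvAnyNb image haut i j then 255
  else 0

lemma stepA_j_shape (image : List (List Int)) (bas haut : Int) (hh w i : Nat)
    (res : List (List Int)) (j : Nat) (h : pvShape res hh w) :
    pvShape (stepA_j image bas haut i res j) hh w := by
  unfold stepA_j
  split_ifs <;> exact pvWr_shape _ _ _ _ _ _ h

lemma A_inner (image : List (List Int)) (bas haut : Int) (hh w i i' j' : Nat)
    (res : List (List Int)) (hres : pvShape res hh w)
    (hi : i < hh) (hi' : i' < hh) (hj' : j' < w) :
    pvRd ((List.range' 1 (w-2)).foldl (stepA_j image bas haut i) res) i' j' =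
      if i = i' ∧ 1 ≤ j' ∧ j' + 1 < w then cellA image bas haut i' j'
      else pvRd res i' j' := by
  by_cases hc : i = i' ∧ 1 ≤ j' ∧ j' + 1 < w
  · rw [if_pos hc]
    obtain ⟨rfl, hj1, hj2⟩ := hc
    have hwrite : ∀ (res : List (List Int)), pvShape res hh w →
        pvRd (stepA_j image bas haut i res j') i j' = cellA image bas haut i j' := by
      intro res hsh
      have hb1 : i < res.length := by rw [hsh.1]; exact hi
      have hb2 : j' < (res.getD i []).length := by rw [hsh.2 i hi]; exact hj'
      unfold stepA_j cellA
      split_ifs <;> rw [pv_rd_wr, if_pos ⟨rfl, rfl, hb1, hb2⟩]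
    refine pv_foldl_rd_hit _ _ _ hh w i j' _
      (fun res j _ => stepA_j_shape image bas haut hh w i res j) hres ?_
      ⟨j', (pv_mem_range' _ _ _).mpr ⟨hj1, by omega⟩, fun res hsh => hwrite res hsh⟩
    intro res j hjm hsh
    by_cases hjj : j = j'
    · subst hjj; right; exact hwrite res hsh
    · left
      unfold stepA_j
      split_ifs <;> rw [pv_rd_wr, if_neg (by rintro ⟨-, rfl, -, -⟩; exact hjj rfl)]
  · rw [if_neg hc]
    refine pv_foldl_rd_const _ _ _ hh w i' j'
      (fun res j _ => stepA_j_shape image bas haut hh w i res j) hres ?_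
    intro res j hjm hsh
    have hjr : 1 ≤ j ∧ j < 1 + (w-2) := (pv_mem_range' _ _ _).mp hjm
    have hne : ¬(i = i' ∧ j = j' ∧ i < res.length ∧ j < (res.getD i []).length) := by
      rintro ⟨rfl, rfl, -, -⟩
      exact hc ⟨rfl, by omega, by omega⟩
    unfold stepA_j
    split_ifs <;> rw [pv_rd_wr, if_neg hne]

lemma A_rd (image : List (List Int)) (bas haut : Int) (i' j' : Nat)
    (hi' : i' < image.length) (hj' : j' < image.headI.length) :
    pvRd (seuillage_hysteresis image bas haut) i' j' =
      if 1 ≤ i' ∧ i' + 1 < image.length ∧ 1 ≤ j' ∧ j' + 1 < image.headI.length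
      then cellA image bas haut i' j' else 0 := by
  unfold seuillage_hysteresis
  set hh := image.length with hhh
  set w := image.headI.length with hww
  have hsin : ∀ (res : List (List Int)) (i : Nat), i ∈ List.range' 1 (hh-2) →
      pvShape res hh w →
      pvShape ((List.range' 1 (w-2)).foldl (stepA_j image bas haut i) res) hh w := by
    intro res i _ hsh
    exact pv_foldl_shape _ _ _ hh w (fun res j _ => stepA_j_shape image bas haut hh w i res j) hsh
  by_cases hc : 1 ≤ i' ∧ i' + 1 < hh ∧ 1 ≤ j' ∧ j' + 1 < w
  · rw [if_pos hc]
    obtain ⟨h1, h2, h3, h4⟩ := hc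
    refine pv_foldl_rd_hit _ _ _ hh w i' j' _ hsin (pv_shape_rep hh w) ?_
      ⟨i', (pv_mem_range' _ _ _).mpr ⟨h1, by omega⟩, ?_⟩
    · intro res i him hsh
      have hir : 1 ≤ i ∧ i < 1 + (hh-2) := (pv_mem_range' _ _ _).mp him
      rw [A_inner image bas haut hh w i i' j' res hsh (by omega) hi' hj']
      by_cases hii : i = i' ∧ 1 ≤ j' ∧ j' + 1 < w
      · rw [if_pos hii]; right; rfl
      · rw [if_neg hii]; left; rfl
    · intro res hsh
      rw [A_inner image bas haut hh w i' i' j' res hsh (by omega) hi' hj',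
        if_pos ⟨rfl, h3, h4⟩]
  · rw [if_neg hc]
    rw [pv_foldl_rd_const _ _ _ hh w i' j' hsin (pv_shape_rep hh w) ?_]
    · exact pv_rd_rep hh w i' j'
    · intro res i him hsh
      have hir : 1 ≤ i ∧ i < 1 + (hh-2) := (pv_mem_range' _ _ _).mp him
      rw [A_inner image bas haut hh w i i' j' res hsh (by omega) hi' hj',
        if_neg (by rintro ⟨rfl, hb, hb2⟩; exact hc ⟨by omega, by omega, hb, hb2⟩)]

lemma A_shape (image : List (List Int)) (bas haut : Int) :
    pvShape (seuillage_hysteresis image bas haut) image.length image.headI.length := by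
  unfold seuillage_hysteresis
  refine pv_foldl_shape _ _ _ _ _ ?_ (pv_shape_rep _ _)
  intro res i _ hsh
  exact pv_foldl_shape _ _ _ _ _
    (fun res j _ => stepA_j_shape image bas haut _ _ i res j) hsh

-- ----- B, pass 1 -----

lemma stepB1_j_shape (image : List (List Int)) (haut : Int) (hh w i : Nat)
    (res : List (List Int)) (j : Nat) (h : pvShape res hh w) :
    pvShape (stepB1_j image haut i res j) hh w := by
  unfold stepB1_j
  split_ifs
  · exact pvWr_shape _ _ _ _ _ _ h
  · exact h

lemma B1_inner (image : List (List Int)) (haut : Int) (hh w i i' j' : Nat)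
    (res : List (List Int)) (hres : pvShape res hh w)
    (hi : i < hh) (hi' : i' < hh) (hj' : j' < w) :
    pvRd ((List.range' 1 (w-2)).foldl (stepB1_j image haut i) res) i' j' =
      if i = i' ∧ 1 ≤ j' ∧ j' + 1 < w ∧ haut ≤ pvRd image i' j' then 255
      else pvRd res i' j' := by
  by_cases hc : i = i' ∧ 1 ≤ j' ∧ j' + 1 < w ∧ haut ≤ pvRd image i' j'
  · rw [if_pos hc]
    obtain ⟨rfl, hj1, hj2, hstr⟩ := hc
    have hwrite : ∀ (res : List (List Int)), pvShape res hh w →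
        pvRd (stepB1_j image haut i res j') i j' = 255 := by
      intro res hsh
      have hb1 : i < res.length := by rw [hsh.1]; exact hi
      have hb2 : j' < (res.getD i []).length := by rw [hsh.2 i hi]; exact hj'
      unfold stepB1_j
      rw [if_pos hstr, pv_rd_wr, if_pos ⟨rfl, rfl, hb1, hb2⟩]
    refine pv_foldl_rd_hit _ _ _ hh w i j' _
      (fun res j _ => stepB1_j_shape image haut hh w i res j) hres ?_
      ⟨j', (pv_mem_range' _ _ _).mpr ⟨hj1, by omega⟩, fun res hsh => hwrite res hsh⟩
    intro res j hjm hsh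
    by_cases hjj : j = j'
    · subst hjj; right; exact hwrite res hsh
    · unfold stepB1_j
      split_ifs
      · left; rw [pv_rd_wr, if_neg (by rintro ⟨-, rfl, -, -⟩; exact hjj rfl)]
      · left; rfl
  · rw [if_neg hc]
    refine pv_foldl_rd_const _ _ _ hh w i' j'
      (fun res j _ => stepB1_j_shape image haut hh w i res j) hres ?_
    intro res j hjm hsh
    have hjr : 1 ≤ j ∧ j < 1 + (w-2) := (pv_mem_range' _ _ _).mp hjm
    unfold stepB1_j
    split_ifs with hstr
    · rw [pv_rd_wr,
        if_neg (by rintro ⟨rfl, rfl, -, -⟩; exact hc ⟨rfl, by omega, by omega, hstr⟩)]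
    · rfl

lemma B1_rd (image : List (List Int)) (haut : Int) (hh w i' j' : Nat)
    (hi' : i' < hh) (hj' : j' < w) :
    pvRd ((List.range' 1 (hh-2)).foldl
        (fun res i => (List.range' 1 (w-2)).foldl (stepB1_j image haut i) res)
        (List.replicate hh (List.replicate w 0))) i' j' =
      if 1 ≤ i' ∧ i' + 1 < hh ∧ 1 ≤ j' ∧ j' + 1 < w ∧ haut ≤ pvRd image i' j'
      then 255 else 0 := by
  have hsin : ∀ (res : List (List Int)) (i : Nat), i ∈ List.range' 1 (hh-2) →
      pvShape res hh w →
      pvShape ((List.range' 1 (w-2)).foldl (stepB1_j image haut i) res) hh w :=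
    fun res i _ hsh => pv_foldl_shape _ _ _ hh w
      (fun res j _ => stepB1_j_shape image haut hh w i res j) hsh
  by_cases hc : 1 ≤ i' ∧ i' + 1 < hh ∧ 1 ≤ j' ∧ j' + 1 < w ∧ haut ≤ pvRd image i' j'
  · rw [if_pos hc]
    obtain ⟨h1, h2, h3, h4, h5⟩ := hc
    refine pv_foldl_rd_hit _ _ _ hh w i' j' _ hsin (pv_shape_rep hh w) ?_
      ⟨i', (pv_mem_range' _ _ _).mpr ⟨h1, by omega⟩, ?_⟩
    · intro res i him hsh
      have hir : 1 ≤ i ∧ i < 1 + (hh-2) := (pv_mem_range' _ _ _).mp him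
      rw [B1_inner image haut hh w i i' j' res hsh (by omega) hi' hj']
      split_ifs
      · right; rfl
      · left; rfl
    · intro res hsh
      rw [B1_inner image haut hh w i' i' j' res hsh (by omega) hi' hj',
        if_pos ⟨rfl, h3, h4, h5⟩]
  · rw [if_neg hc]
    rw [pv_foldl_rd_const _ _ _ hh w i' j' hsin (pv_shape_rep hh w) ?_]
    · exact pv_rd_rep hh w i' j'
    · intro res i him hsh
      have hir : 1 ≤ i ∧ i < 1 + (hh-2) := (pv_mem_range' _ _ _).mp him
      rw [B1_inner image haut hh w i i' j' res hsh (by omega) hi' hj',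
        if_neg (by rintro ⟨rfl, hb, hb2, hb3⟩; exact hc ⟨by omega, by omega, hb, hb2, hb3⟩)]

-- ----- B, pass 2 -----

lemma stepB2_j_shape (image : List (List Int)) (bas haut : Int) (hh w i : Nat)
    (res : List (List Int)) (j : Nat) (h : pvShape res hh w) :
    pvShape (stepB2_j image bas haut i res j) hh w := by
  unfold stepB2_j
  split_ifs
  · exact pvWr_shape _ _ _ _ _ _ h
  · exact h

lemma stepB2_i_shape (image : List (List Int)) (bas haut : Int) (hh w q : Nat)
    (res : List (List Int)) (i : Nat) (h : pvShape res hh w) :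
    pvShape (stepB2_i image bas haut w q res i) hh w := by
  unfold stepB2_i
  exact pv_foldl_shape _ _ _ hh w
    (fun res j _ => stepB2_j_shape image bas haut hh w i res j) h

lemma stepB2_q_shape (image : List (List Int)) (bas haut : Int) (hh w p : Nat)
    (res : List (List Int)) (q : Nat) (h : pvShape res hh w) :
    pvShape (stepB2_q image bas haut hh w p res q) hh w := by
  unfold stepB2_q
  split_ifs
  · exact pv_foldl_shape _ _ _ hh w
      (fun res i _ => stepB2_i_shape image bas haut hh w q res i) h
  · exact h

lemma stepB2_p_shape (image : List (List Int)) (bas haut : Int) (hh w : Nat)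
    (res : List (List Int)) (p : Nat) (h : pvShape res hh w) :
    pvShape (stepB2_p image bas haut hh w res p) hh w := by
  unfold stepB2_p
  exact pv_foldl_shape _ _ _ hh w
    (fun res q _ => stepB2_q_shape image bas haut hh w p res q) h

lemma B2i_rd (image : List (List Int)) (bas haut : Int) (hh w q i i' j' : Nat)
    (res : List (List Int)) (hres : pvShape res hh w)
    (hi : i < hh) (hi' : i' < hh) (hj' : j' < w) :
    pvRd (stepB2_i image bas haut w q res i) i' j' =
      if i = i' ∧ (max 1 (q-1) ≤ j' ∧ j' ≤ min (w-2) (q+1)) ∧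
          bas ≤ pvRd image i' j' ∧ pvRd image i' j' < haut
      then 255 else pvRd res i' j' := by
  unfold stepB2_i
  by_cases hc : i = i' ∧ (max 1 (q-1) ≤ j' ∧ j' ≤ min (w-2) (q+1)) ∧
      bas ≤ pvRd image i' j' ∧ pvRd image i' j' < haut
  · rw [if_pos hc]
    obtain ⟨rfl, ⟨hj1, hj2⟩, hwk⟩ := hc
    have hwrite : ∀ (res : List (List Int)), pvShape res hh w →
        pvRd (stepB2_j image bas haut i res j') i j' = 255 := by
      intro res hsh
      have hb1 : i < res.length := by rw [hsh.1]; exact hi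
      have hb2 : j' < (res.getD i []).length := by rw [hsh.2 i hi]; exact hj'
      unfold stepB2_j
      rw [if_pos hwk, pv_rd_wr, if_pos ⟨rfl, rfl, hb1, hb2⟩]
    refine pv_foldl_rd_hit _ _ _ hh w i j' _
      (fun res j _ => stepB2_j_shape image bas haut hh w i res j) hres ?_
      ⟨j', (pv_mem_range' _ _ _).mpr ⟨hj1, by omega⟩, fun res hsh => hwrite res hsh⟩
    intro res j hjm hsh
    by_cases hjj : j = j'
    · subst hjj; right; exact hwrite res hsh
    · unfold stepB2_j
      split_ifs
      · left; rw [pv_rd_wr, if_neg (by rintro ⟨-, rfl, -, -⟩; exact hjj rfl)]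
      · left; rfl
  · rw [if_neg hc]
    refine pv_foldl_rd_const _ _ _ hh w i' j'
      (fun res j _ => stepB2_j_shape image bas haut hh w i res j) hres ?_
    intro res j hjm hsh
    have hjr := (pv_mem_range' _ _ _).mp hjm
    unfold stepB2_j
    split_ifs with hwk
    · rw [pv_rd_wr,
        if_neg (by rintro ⟨rfl, rfl, -, -⟩; exact hc ⟨rfl, ⟨by omega, by omega⟩, hwk⟩)]
    · rfl

lemma B2q_rd (image : List (List Int)) (bas haut : Int) (hh w p q i' j' : Nat)
    (res : List (List Int)) (hres : pvShape res hh w)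
    (hi' : i' < hh) (hj' : j' < w) :
    pvRd (stepB2_q image bas haut hh w p res q) i' j' =
      if haut ≤ (image.getD p []).getD q 0 ∧
          (max 1 (p-1) ≤ i' ∧ i' ≤ min (hh-2) (p+1)) ∧
          (max 1 (q-1) ≤ j' ∧ j' ≤ min (w-2) (q+1)) ∧
          bas ≤ pvRd image i' j' ∧ pvRd image i' j' < haut
      then 255 else pvRd res i' j' := by
  unfold stepB2_q
  by_cases hstr : haut ≤ (image.getD p []).getD q 0
  · rw [if_pos hstr]
    by_cases hc : (max 1 (p-1) ≤ i' ∧ i' ≤ min (hh-2) (p+1)) ∧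
        (max 1 (q-1) ≤ j' ∧ j' ≤ min (w-2) (q+1)) ∧
        bas ≤ pvRd image i' j' ∧ pvRd image i' j' < haut
    · rw [if_pos ⟨hstr, hc⟩]
      obtain ⟨⟨hi1, hi2⟩, hrest⟩ := hc
      refine pv_foldl_rd_hit _ _ _ hh w i' j' _
        (fun res i _ => stepB2_i_shape image bas haut hh w q res i) hres ?_
        ⟨i', (pv_mem_range' _ _ _).mpr ⟨hi1, by omega⟩, ?_⟩
      · intro res i him hsh
        have hir := (pv_mem_range' _ _ _).mp him
        rw [B2i_rd image bas haut hh w q i i' j' res hsh (by omega) hi' hj']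
        split_ifs
        · right; rfl
        · left; rfl
      · intro res hsh
        rw [B2i_rd image bas haut hh w q i' i' j' res hsh hi' hi' hj',
          if_pos ⟨rfl, hrest⟩]
    · rw [if_neg (by rintro ⟨-, h2⟩; exact hc h2)]
      refine pv_foldl_rd_const _ _ _ hh w i' j'
        (fun res i _ => stepB2_i_shape image bas haut hh w q res i) hres ?_
      intro res i him hsh
      have hir := (pv_mem_range' _ _ _).mp him
      rw [B2i_rd image bas haut hh w q i i' j' res hsh (by omega) hi' hj',
        if_neg (by rintro ⟨rfl, hb⟩; exact hc ⟨⟨by omega, by omega⟩, hb⟩)]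
  · rw [if_neg hstr, if_neg (by rintro ⟨h1, -⟩; exact hstr h1)]

-- Bool form of "some strong pixel in row p lights the target cell"
def pvHitP (image : List (List Int)) (bas haut : Int) (hh w p i' j' : Nat) : Bool :=
  (List.range (image.getD p []).length).any fun q =>
    decide (haut ≤ (image.getD p []).getD q 0 ∧
      (max 1 (p-1) ≤ i' ∧ i' ≤ min (hh-2) (p+1)) ∧
      (max 1 (q-1) ≤ j' ∧ j' ≤ min (w-2) (q+1)) ∧
      bas ≤ pvRd image i' j' ∧ pvRd image i' j' < haut)

lemma pvHitP_iff (image : List (List Int)) (bas haut : Int) (hh w p i' j' : Nat) :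
    pvHitP image bas haut hh w p i' j' = true ↔
      ∃ q, q < (image.getD p []).length ∧
        (haut ≤ (image.getD p []).getD q 0 ∧
          (max 1 (p-1) ≤ i' ∧ i' ≤ min (hh-2) (p+1)) ∧
          (max 1 (q-1) ≤ j' ∧ j' ≤ min (w-2) (q+1)) ∧
          bas ≤ pvRd image i' j' ∧ pvRd image i' j' < haut) := by
  simp [pvHitP, List.any_eq_true, List.mem_range]

def pvHit (image : List (List Int)) (bas haut : Int) (hh w i' j' : Nat) : Bool :=
  (List.range hh).any fun p => pvHitP image bas haut hh w p i' j'

lemma pvHit_iff (image : List (List Int)) (bas haut : Int) (hh w i' j' : Nat) :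
    pvHit image bas haut hh w i' j' = true ↔
      ∃ p, p < hh ∧ pvHitP image bas haut hh w p i' j' = true := by
  simp [pvHit, List.any_eq_true, List.mem_range]

lemma B2p_rd (image : List (List Int)) (bas haut : Int) (hh w p i' j' : Nat)
    (res : List (List Int)) (hres : pvShape res hh w)
    (hi' : i' < hh) (hj' : j' < w) :
    pvRd (stepB2_p image bas haut hh w res p) i' j' =
      if pvHitP image bas haut hh w p i' j' then 255 else pvRd res i' j' := by
  unfold stepB2_p
  by_cases hc : pvHitP image bas haut hh w p i' j' = true
  · rw [if_pos hc]
    obtain ⟨q, hq, hrest⟩ := (pvHitP_iff image bas haut hh w p i' j').mp hc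
    refine pv_foldl_rd_hit _ _ _ hh w i' j' _
      (fun res q _ => stepB2_q_shape image bas haut hh w p res q) hres ?_
      ⟨q, List.mem_range.mpr hq, ?_⟩
    · intro res q him hsh
      rw [B2q_rd image bas haut hh w p q i' j' res hsh hi' hj']
      split_ifs
      · right; rfl
      · left; rfl
    · intro res hsh
      rw [B2q_rd image bas haut hh w p q i' j' res hsh hi' hj', if_pos hrest]
  · rw [if_neg hc]
    refine pv_foldl_rd_const _ _ _ hh w i' j'
      (fun res q _ => stepB2_q_shape image bas haut hh w p res q) hres ?_
    intro res q him hsh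
    rw [B2q_rd image bas haut hh w p q i' j' res hsh hi' hj',
      if_neg (fun h => hc ((pvHitP_iff image bas haut hh w p i' j').mpr
        ⟨q, List.mem_range.mp him, h⟩))]

lemma B_shape (image : List (List Int)) (bas haut : Int) :
    pvShape (seuillage_hysteresis_alt image bas haut) image.length image.headI.length := by
  unfold seuillage_hysteresis_alt
  refine pv_foldl_shape _ _ _ _ _
    (fun res p _ hsh => stepB2_p_shape image bas haut _ _ res p hsh) ?_
  refine pv_foldl_shape _ _ _ _ _ ?_ (pv_shape_rep _ _)
  intro res i _ hsh
  exact pv_foldl_shape _ _ _ _ _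
    (fun res j _ => stepB1_j_shape image haut _ _ i res j) hsh

lemma B_rd (image : List (List Int)) (bas haut : Int) (i' j' : Nat)
    (hi' : i' < image.length) (hj' : j' < image.headI.length) :
    pvRd (seuillage_hysteresis_alt image bas haut) i' j' =
      (if 1 ≤ i' ∧ i' + 1 < image.length ∧ 1 ≤ j' ∧ j' + 1 < image.headI.length ∧
          haut ≤ pvRd image i' j' then 255
       else if pvHit image bas haut image.length image.headI.length i' j' then 255
       else 0) := by
  unfold seuillage_hysteresis_alt
  set hh := image.length with hhh
  set w := image.headI.length with hww
  have hres1 : pvShape ((List.range' 1 (hh-2)).foldl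
      (fun res i => (List.range' 1 (w-2)).foldl (stepB1_j image haut i) res)
      (List.replicate hh (List.replicate w 0))) hh w := by
    refine pv_foldl_shape _ _ _ _ _ ?_ (pv_shape_rep _ _)
    intro res i _ hsh
    exact pv_foldl_shape _ _ _ _ _
      (fun res j _ => stepB1_j_shape image haut hh w i res j) hsh
  by_cases hc : pvHit image bas haut hh w i' j' = true
  · rw [if_pos hc]
    have hnstr : ¬(1 ≤ i' ∧ i' + 1 < hh ∧ 1 ≤ j' ∧ j' + 1 < w ∧ haut ≤ pvRd image i' j') := by
      rintro ⟨-, -, -, -, hstr⟩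
      obtain ⟨p, -, hpp⟩ := (pvHit_iff image bas haut hh w i' j').mp hc
      obtain ⟨q, -, -, -, -, -, hlt⟩ := (pvHitP_iff image bas haut hh w p i' j').mp hpp
      omega
    rw [if_neg hnstr]
    obtain ⟨p, hp, hpp⟩ := (pvHit_iff image bas haut hh w i' j').mp hc
    refine pv_foldl_rd_hit _ _ _ hh w i' j' _
      (fun res p _ => stepB2_p_shape image bas haut hh w res p) hres1 ?_
      ⟨p, List.mem_range.mpr hp, ?_⟩
    · intro res p him hsh
      rw [B2p_rd image bas haut hh w p i' j' res hsh hi' hj']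
      split_ifs
      · right; rfl
      · left; rfl
    · intro res hsh
      rw [B2p_rd image bas haut hh w p i' j' res hsh hi' hj', if_pos hpp]
  · rw [pv_foldl_rd_const _ _ _ hh w i' j'
      (fun res p _ => stepB2_p_shape image bas haut hh w res p) hres1 ?_]
    · rw [B1_rd image haut hh w i' j' hi' hj']
      rw [if_neg hc]
    · intro res p him hsh
      rw [B2p_rd image bas haut hh w p i' j' res hsh hi' hj',
        if_neg (fun h => hc ((pvHit_iff image bas haut hh w i' j').mpr
          ⟨p, List.mem_range.mp him, h⟩))]

-- ----- the gather/scatter neighbourhood equivalence -----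

lemma nb_equiv (image : List (List Int)) (bas haut : Int) (i j : Nat)
    (hrow : ∀ row ∈ image, image.headI.length ≤ row.length)
    (g1 : 1 ≤ i) (g2 : i + 1 < image.length)
    (g3 : 1 ≤ j) (g4 : j + 1 < image.headI.length)
    (hwk : bas ≤ pvRd image i j ∧ pvRd image i j < haut) :
    (pvAnyNb image haut i j = true ↔
      pvHit image bas haut image.length image.headI.length i j = true) := by
  rw [pvHit_iff]
  simp only [pvAnyNb, List.any_eq_true, decide_eq_true_eq]
  constructor
  · rintro ⟨ni, hni, nj, hnj, hv⟩
    obtain ⟨hn1, hn2⟩ := (pv_mem_range' _ _ _).mp hni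
    obtain ⟨hm1, hm2⟩ := (pv_mem_range' _ _ _).mp hnj
    have hnih : ni < image.length := by omega
    have hrl : image.headI.length ≤ (image.getD ni []).length := by
      refine hrow _ ?_
      rw [List.getD_eq_getElem _ _ hnih]
      exact List.getElem_mem _
    refine ⟨ni, hnih, ?_⟩
    rw [pvHitP_iff]
    exact ⟨nj, by omega, hv, ⟨by omega, by omega⟩, ⟨by omega, by omega⟩, hwk⟩
  · rintro ⟨p, hp, hpp⟩
    rw [pvHitP_iff] at hpp
    obtain ⟨q, hq, hv, ⟨hci1, hci2⟩, ⟨hcj1, hcj2⟩, -⟩ := hpp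
    exact ⟨p, (pv_mem_range' _ _ _).mpr ⟨by omega, by omega⟩,
      q, (pv_mem_range' _ _ _).mpr ⟨by omega, by omega⟩, hv⟩

-- ----- assembly -----

lemma cell_eq (image : List (List Int)) (bas haut : Int) (i j : Nat)
    (hpre : Pre_seuillage_hysteresis image bas haut)
    (hi : i < image.length) (hj : j < image.headI.length) :
    pvRd (seuillage_hysteresis image bas haut) i j =
      pvRd (seuillage_hysteresis_alt image bas haut) i j := by
  rw [A_rd image bas haut i j hi hj, B_rd image bas haut i j hi hj]
  by_cases hint : 1 ≤ i ∧ i + 1 < image.length ∧ 1 ≤ j ∧ j + 1 < image.headI.length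
  · obtain ⟨g1, g2, g3, g4⟩ := hint
    have hrow : ∀ row ∈ image, image.headI.length ≤ row.length :=
      hpre.2 (by omega) (by omega)
    rw [if_pos ⟨g1, g2, g3, g4⟩]
    unfold cellA
    by_cases hstr : haut ≤ pvRd image i j
    · rw [if_pos hstr, if_pos ⟨g1, g2, g3, g4, hstr⟩]
    · have hnB : ¬(1 ≤ i ∧ i + 1 < image.length ∧ 1 ≤ j ∧ j + 1 < image.headI.length ∧
          haut ≤ pvRd image i j) := fun h => hstr h.2.2.2.2
      rw [if_neg hstr, if_neg hnB]
      by_cases hlow : pvRd image i j < bas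
      · have hnHit : ¬(pvHit image bas haut image.length image.headI.length i j = true) := by
          intro h
          obtain ⟨p, -, hpp⟩ := (pvHit_iff image bas haut _ _ i j).mp h
          obtain ⟨q, -, -, -, -, hble, -⟩ := (pvHitP_iff image bas haut _ _ p i j).mp hpp
          omega
        rw [if_pos hlow, if_neg hnHit]
      · rw [if_neg hlow]
        have hiff := nb_equiv image bas haut i j hrow g1 g2 g3 g4 ⟨by omega, by omega⟩
        by_cases hany : pvAnyNb image haut i j = true
        · rw [if_pos hany, if_pos (hiff.mp hany)]
        · rw [if_neg hany, if_neg (fun h => hany (hiff.mpr h))]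
  · rw [if_neg hint, if_neg (by rintro ⟨a, b, c, d, -⟩; exact hint ⟨a, b, c, d⟩),
      if_neg ?_]
    intro h
    obtain ⟨p, -, hpp⟩ := (pvHit_iff image bas haut _ _ i j).mp h
    obtain ⟨q, -, -, ⟨hci1, hci2⟩, ⟨hcj1, hcj2⟩, -⟩ :=
      (pvHitP_iff image bas haut _ _ p i j).mp hpp
    exact hint ⟨by omega, by omega, by omega, by omega⟩

-- ===== VERDICT (by name: the statement is the Claim_ definition above) =====
theorem seuillage_hysteresis_spec : Claim_equal_seuillage_hysteresis := by
  intro image bas haut _ hpre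
  unfold Spec_seuillage_hysteresis
  have hA := A_shape image bas haut
  have hB := B_shape image bas haut
  apply List.ext_getElem (by rw [hA.1, hB.1])
  intro i hi1 hi2
  have hih : i < image.length := by rw [← hA.1]; exact hi1
  have hrowA : (seuillage_hysteresis image bas haut)[i].length = image.headI.length := by
    have := hA.2 i hih
    rwa [List.getD_eq_getElem _ _ hi1] at this
  have hrowB : (seuillage_hysteresis_alt image bas haut)[i].length = image.headI.length := by
    have := hB.2 i hih
    rwa [List.getD_eq_getElem _ _ hi2] at this
  apply List.ext_getElem (by rw [hrowA, hrowB])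
  intro j hj1 hj2
  have hjw : j < image.headI.length := by rw [← hrowA]; exact hj1
  have eA : pvRd (seuillage_hysteresis image bas haut) i j =
      (seuillage_hysteresis image bas haut)[i][j] := by
    unfold pvRd
    rw [List.getD_eq_getElem _ _ hi1]
    exact List.getD_eq_getElem _ _ hj1
  have eB : pvRd (seuillage_hysteresis_alt image bas haut) i j =
      (seuillage_hysteresis_alt image bas haut)[i][j] := by
    unfold pvRd
    rw [List.getD_eq_getElem _ _ hi2]
    exact List.getD_eq_getElem _ _ hj2
  rw [← eA, ← eB]
  exact cell_eq image bas haut i j hpre hih hjw
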